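-- pv_equiv track=rewrite | github.com/A14N77/colonel | colonel/utils/parsers.py | pivot_ncu_rows
-- ===== SOURCE A (Python) =====
-- def pivot_ncu_rows(
--     rows: list[dict[str, str]],
-- ) -> dict[str, list[dict[str, str]]]:
--     """Pivot long-format ncu CSV into per-launch metric dicts grouped by kernel.
--
--     Each input row has columns like ``Kernel Name``, ``Metric Name``,
--     ``Metric Value``, ``Block Size``, ``Grid Size``, etc.  We pivot so
--     that each launch (identified by ID + Kernel Name) becomes a single
--     dict mapping metric names to their values, plus the per-row columns
--     that are the same across all metrics for a launch.
--
--     Returns: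
--         ``{kernel_name: [launch_dict, …]}`` where each *launch_dict*
--         maps metric names (e.g. ``"Duration"``, ``"Achieved Occupancy"``)
--         to string values, and also contains ``"Block Size"``,
--         ``"Grid Size"`` etc.
--     """
--     # Group rows by (ID, Kernel Name) to get one group per launch
--     launches: dict[tuple[str, str], dict[str, str]] = {}
--     for row in rows:
--         kernel = row.get("Kernel Name", "")
--         launch_id = row.get("ID", "")
--         if not kernel:
--             continue
--
--         key = (launch_id, kernel)
--         if key not in launches:
--             # Seed with the non-metric columns that are constant per launch
--             launches[key] = {
--                 "Kernel Name": kernel,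
--                 "Block Size": row.get("Block Size", ""),
--                 "Grid Size": row.get("Grid Size", ""),
--                 "Device": row.get("Device", ""),
--                 "CC": row.get("CC", ""),
--                 "Context": row.get("Context", ""),
--                 "Stream": row.get("Stream", ""),
--             }
--
--         metric_name = row.get("Metric Name", "").strip()
--         metric_value = row.get("Metric Value", "").strip()
--         metric_unit = row.get("Metric Unit", "").strip()
--         section = row.get("Section Name", "").strip()
--
--         if metric_name and metric_value:
--             # Store as "Metric Name" -> value (primary lookup)
--             launches[key][metric_name] = metric_value
--             # Also store with unit for Duration-type metrics
--             if metric_unit and metric_unit not in ("%",):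
--                 launches[key][f"{metric_name}__unit"] = metric_unit
--             # Store section-qualified name for disambiguation
--             if section:
--                 launches[key][f"{section}::{metric_name}"] = metric_value
--
--     # Group by kernel name
--     result: dict[str, list[dict[str, str]]] = {}
--     for (_lid, kernel), data in launches.items():
--         result.setdefault(kernel, []).append(data)
--     return result
-- ===== SOURCE B (Python) =====
-- def pivot_ncu_rows(
--     rows: list[dict[str, str]],
-- ) -> dict[str, list[dict[str, str]]]:
--     """Pivot long-format ncu CSV rows into per-kernel launch dicts.
--
--     Gather-based reformulation: dedup the (ID, Kernel Name) launch keys in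
--     first-occurrence order, build each launch dict independently from the
--     rows belonging to it, then group the launch dicts by kernel name.
--     """
--     valid = [row for row in rows if row.get("Kernel Name", "")]
--     keys = list(dict.fromkeys(
--         (row.get("ID", ""), row.get("Kernel Name", "")) for row in valid))
--
--     def build(key):
--         mine = [row for row in valid
--                 if (row.get("ID", ""), row.get("Kernel Name", "")) == key]
--         first = mine[0]
--         d = {
--             "Kernel Name": key[1],
--             "Block Size": first.get("Block Size", ""),
--             "Grid Size": first.get("Grid Size", ""),
--             "Device": first.get("Device", ""),
--             "CC": first.get("CC", ""),
--             "Context": first.get("Context", ""),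
--             "Stream": first.get("Stream", ""),
--         }
--         for row in mine:
--             name = row.get("Metric Name", "").strip()
--             value = row.get("Metric Value", "").strip()
--             unit = row.get("Metric Unit", "").strip()
--             section = row.get("Section Name", "").strip()
--             if name and value:
--                 d[name] = value
--                 if unit and unit != "%":
--                     d[f"{name}__unit"] = unit
--                 if section:
--                     d[f"{section}::{name}"] = value
--         return d
--
--     kernels = dict.fromkeys(k for _, k in keys)
--     return {k: [build(key) for key in keys if key[1] == k] for k in kernels}
-- ===== Notes on version B (the rewrite author's own statement) =====
-- stated objective: alternative
-- what changed: A streams rows into an incremental (ID, kernel)-keyed dict of mutable launch dicts and then regroups it in a second loop; B first dedups the launch keys, builds each launch dict independently from its own filtered rows, and groups per kernel with comprehensions.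
import Mathlib
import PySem

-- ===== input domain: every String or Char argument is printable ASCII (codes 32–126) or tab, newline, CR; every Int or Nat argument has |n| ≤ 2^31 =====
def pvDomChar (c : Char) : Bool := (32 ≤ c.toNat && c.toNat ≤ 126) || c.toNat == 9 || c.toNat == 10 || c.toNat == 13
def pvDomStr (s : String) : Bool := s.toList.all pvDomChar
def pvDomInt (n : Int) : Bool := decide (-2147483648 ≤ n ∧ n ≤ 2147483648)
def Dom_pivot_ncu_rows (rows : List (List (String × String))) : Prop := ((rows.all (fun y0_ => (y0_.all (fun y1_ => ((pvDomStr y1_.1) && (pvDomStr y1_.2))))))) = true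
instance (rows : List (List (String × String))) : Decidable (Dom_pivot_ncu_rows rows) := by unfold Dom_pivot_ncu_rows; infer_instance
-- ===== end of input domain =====

-- B re-decomposes A's incremental pivot: dedup the launch keys up front, build each
-- launch dict independently from its own rows, and group by kernel with comprehensions
-- (objective: alternative decomposition, same results; no speed claim).

-- ===== PORT A =====
-- row.get(k, "") on a dict-as-association-list: first match, default ""
def rgetA (row : List (String × String)) (k : String) : String :=
  ((row.find? (fun p => p.1 == k)).map Prod.snd).getD ""

-- the seed dict literal of A
def seedA (kernel : String) (row : List (String × String)) : PySem.Dict String String :=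
  PySem.Dict.ofList [("Kernel Name", kernel),
    ("Block Size", rgetA row "Block Size"), ("Grid Size", rgetA row "Grid Size"),
    ("Device", rgetA row "Device"), ("CC", rgetA row "CC"),
    ("Context", rgetA row "Context"), ("Stream", rgetA row "Stream")]

-- one iteration of A's first loop (the `continue` is the top-level if)
def stepA (launches : PySem.Dict (String × String) (PySem.Dict String String))
    (row : List (String × String)) : PySem.Dict (String × String) (PySem.Dict String String) :=
  let kernel := rgetA row "Kernel Name"
  let launch_id := rgetA row "ID"
  if kernel == "" then launches
  else
    let key := (launch_id, kernel)
    let launches := if launches.contains key then launches else launches.insert key (seedA kernel row)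
    let mn := PySem.Str.strip (rgetA row "Metric Name")
    let mv := PySem.Str.strip (rgetA row "Metric Value")
    let mu := PySem.Str.strip (rgetA row "Metric Unit")
    let sec := PySem.Str.strip (rgetA row "Section Name")
    if mn ≠ "" ∧ mv ≠ "" then
      -- launches[key][…] = … rendered as re-inserting the updated inner dict at key
      let launches := launches.insert key ((launches.getD key PySem.Dict.empty).insert mn mv)
      let launches := if mu ≠ "" ∧ mu ≠ "%" then
          launches.insert key ((launches.getD key PySem.Dict.empty).insert (mn ++ "__unit") mu)
        else launches
      if sec ≠ "" then
        launches.insert key ((launches.getD key PySem.Dict.empty).insert (sec ++ "::" ++ mn) mv)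
      else launches
    else launches

def pivot_ncu_rows (rows : List (List (String × String))) : List (String × List (List (String × String))) :=
  let launches := rows.foldl stepA PySem.Dict.empty
  -- result.setdefault(kernel, []).append(data)  =  modify kernel [] (· ++ [data])
  let result := launches.items.foldl
    (fun res p => res.modify p.1.2 [] (fun x => x ++ [p.2])) PySem.Dict.empty
  result.items.map (fun p => (p.1, p.2.map PySem.Dict.items))

-- ===== PORT B =====
def rgetB (row : List (String × String)) (k : String) : String :=
  ((row.find? (fun p => p.1 == k)).map Prod.snd).getD ""

def keyOfB (row : List (String × String)) : String × String :=
  (rgetB row "ID", rgetB row "Kernel Name")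

def seedB (key : String × String) (first : List (String × String)) : PySem.Dict String String :=
  PySem.Dict.ofList [("Kernel Name", key.2),
    ("Block Size", rgetB first "Block Size"), ("Grid Size", rgetB first "Grid Size"),
    ("Device", rgetB first "Device"), ("CC", rgetB first "CC"),
    ("Context", rgetB first "Context"), ("Stream", rgetB first "Stream")]

-- body of B's `for row in mine` metric-update loop
def metricsB (d : PySem.Dict String String) (row : List (String × String)) : PySem.Dict String String :=
  let mn := PySem.Str.strip (rgetB row "Metric Name")
  let mv := PySem.Str.strip (rgetB row "Metric Value")
  let mu := PySem.Str.strip (rgetB row "Metric Unit")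
  let sec := PySem.Str.strip (rgetB row "Section Name")
  if mn ≠ "" ∧ mv ≠ "" then
    let d := d.insert mn mv
    let d := if mu ≠ "" ∧ mu ≠ "%" then d.insert (mn ++ "__unit") mu else d
    if sec ≠ "" then d.insert (sec ++ "::" ++ mn) mv else d
  else d

def buildB (valid : List (List (String × String))) (key : String × String) : PySem.Dict String String :=
  let mine := valid.filter (fun r => keyOfB r == key)
  -- mine[0]: for every key handed to buildB, mine is nonempty, so the [] default is unreachable
  let first := mine.headD []
  mine.foldl metricsB (seedB key first)

def pivot_ncu_rows_alt (rows : List (List (String × String))) : List (String × List (List (String × String))) :=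
  let valid := rows.filter (fun r => rgetB r "Kernel Name" != "")
  let keys := PySem.List.dedup (valid.map keyOfB)
  let kernels := PySem.List.dedup (keys.map Prod.snd)
  kernels.map (fun k =>
    (k, ((keys.filter (fun key => key.2 == k)).map (buildB valid)).map PySem.Dict.items))

-- ===== PRECONDITION & SPEC =====
def Spec_pivot_ncu_rows (rows : List (List (String × String))) (out : List (String × List (List (String × String)))) : Prop := out = pivot_ncu_rows_alt rows
instance (rows : List (List (String × String))) (out : List (String × List (List (String × String)))) : Decidable (Spec_pivot_ncu_rows rows out) := by unfold Spec_pivot_ncu_rows; infer_instance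

-- ===== CLAIM (what is proved, stated in full; the proofs are below) =====
def Claim_equal_pivot_ncu_rows : Prop := ∀ (rows : List (List (String × String))), Dom_pivot_ncu_rows rows → Spec_pivot_ncu_rows rows (pivot_ncu_rows rows)

-- ===== LEMMAS AND PROOFS =====

theorem stepA_get? (L : PySem.Dict (String × String) (PySem.Dict String String))
    (row : List (String × String)) (h : rgetA row "Kernel Name" ≠ "")
    (q : String × String) :
    (stepA L row).get? q =
      if q = keyOfB row then
        some (metricsB (if L.contains (keyOfB row) then L.getD (keyOfB row) PySem.Dict.empty
                        else seedA (rgetA row "Kernel Name") row) row)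
      else L.get? q := by
  have hb : (rgetA row "Kernel Name" == "") = false := by
    simp [h]
  simp only [stepA, metricsB, keyOfB, hb, Bool.false_eq_true, if_false]
  have hACK : rgetB = rgetA := rfl
  rw [hACK]
  set key := (rgetA row "ID", rgetA row "Kernel Name") with hkey
  by_cases hc : L.contains key = true
  · have hc2 := hc
    rw [PySem.Dict.contains_eq_isSome_get?] at hc2
    obtain ⟨v, hv⟩ := Option.isSome_iff_exists.mp hc2
    simp only [hc, if_true]
    split_ifs with h1 h2 h3 h4 <;>
      simp_all [PySem.Dict.get?_insert, PySem.Dict.getD_insert, PySem.Dict.getD_eq_get?_getD]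
  · simp only [hc, if_false, Bool.false_eq_true]
    split_ifs with h1 h2 h3 h4 <;>
      simp_all [PySem.Dict.get?_insert, PySem.Dict.getD_insert, PySem.Dict.getD_eq_get?_getD]


theorem stepA_keys (L : PySem.Dict (String × String) (PySem.Dict String String))
    (row : List (String × String)) (h : rgetA row "Kernel Name" ≠ "") :
    (stepA L row).keys = if L.contains (keyOfB row) then L.keys else L.keys ++ [keyOfB row] := by
  have hb : (rgetA row "Kernel Name" == "") = false := by simp [h]
  simp only [stepA, keyOfB, hb, Bool.false_eq_true, if_false]
  have hACK : rgetB = rgetA := rfl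
  rw [hACK]
  set key := (rgetA row "ID", rgetA row "Kernel Name") with hkey
  by_cases hc : L.contains key = true <;>
    [simp only [hc, if_true]; simp only [hc, if_false, Bool.false_eq_true]] <;>
    split_ifs <;>
    simp_all [PySem.Dict.keys_insert_of_contains, PySem.Dict.keys_insert_of_not_contains,
      PySem.Dict.contains_insert]


def buildSpec (valid : List (List (String × String))) (q : String × String) : PySem.Dict String String :=
  (valid.filter (fun r => keyOfB r == q)).foldl metricsB
    (seedA q.2 ((valid.find? (fun r => keyOfB r == q)).getD []))


theorem foldlA_keys (valid : List (List (String × String))) :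
    ∀ (L : PySem.Dict (String × String) (PySem.Dict String String)),
    (∀ r ∈ valid, rgetA r "Kernel Name" ≠ "") →
    (valid.foldl stepA L).keys = PySem.Set.update L.keys (valid.map keyOfB) := by
  induction valid with
  | nil => intro L _; simp [PySem.Set.update]
  | cons r vs ih =>
    intro L hv
    have hr := hv r (by simp)
    simp only [List.foldl_cons, List.map_cons, PySem.Set.update_cons]
    rw [ih _ (fun x hx => hv x (by simp [hx]))]
    congr 1
    rw [stepA_keys L r hr]
    by_cases hc : L.contains (keyOfB r) = true
    · rw [if_pos hc, PySem.Set.add_of_mem ((PySem.Dict.contains_iff_mem_keys L _).mp hc)]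
    · rw [if_neg hc, PySem.Set.add, if_neg]
      intro hm
      exact hc ((PySem.Dict.contains_iff_mem_keys L _).mpr (by simpa using hm))


theorem foldlA_get? (valid : List (List (String × String))) :
    ∀ (L : PySem.Dict (String × String) (PySem.Dict String String)),
    (∀ r ∈ valid, rgetA r "Kernel Name" ≠ "") → ∀ q,
    (valid.foldl stepA L).get? q =
      match L.get? q with
      | some d => some ((valid.filter (fun r => keyOfB r == q)).foldl metricsB d)
      | none => if q ∈ valid.map keyOfB then some (buildSpec valid q) else none := by
  induction valid with
  | nil => intro L _ q; cases hL : L.get? q <;> simp [hL]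
  | cons r vs ih =>
    intro L hv q
    have hr := hv r (by simp)
    simp only [List.foldl_cons]
    rw [ih _ (fun x hx => hv x (by simp [hx])) q]
    by_cases hq : q = keyOfB r
    · subst hq
      rw [stepA_get? L r hr]
      simp only [if_pos rfl]
      have hfilter : (r :: vs).filter (fun x => keyOfB x == keyOfB r)
          = r :: vs.filter (fun x => keyOfB x == keyOfB r) := by
        simp [List.filter_cons]
      cases hL : L.get? (keyOfB r) with
      | some d =>
        have hc : L.contains (keyOfB r) = true := by
          rw [PySem.Dict.contains_eq_isSome_get?, hL]; rfl
        simp only [hc, if_true, hfilter, List.foldl_cons,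
          PySem.Dict.getD_eq_get?_getD, hL, Option.getD_some]
      | none =>
        have hc : L.contains (keyOfB r) = false := by
          rw [PySem.Dict.contains_eq_isSome_get?, hL]; rfl
        have hker : rgetA r "Kernel Name" = (keyOfB r).2 := rfl
        have hfind : (r :: vs).find? (fun x => keyOfB x == keyOfB r) = some r :=
          List.find?_cons_of_pos (by simp)
        simp only [hc, Bool.false_eq_true, if_false, buildSpec, hfilter, List.foldl_cons,
          List.map_cons, List.mem_cons, true_or, if_pos, hfind, Option.getD_some, hker]
    · have hne : (keyOfB r == q) = false := beq_eq_false_iff_ne.mpr (Ne.symm hq)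
      rw [stepA_get? L r hr]
      simp only [if_neg hq]
      have hfilter : (r :: vs).filter (fun x => keyOfB x == q)
          = vs.filter (fun x => keyOfB x == q) := by
        simp [List.filter_cons, hne]
      cases hL : L.get? q with
      | some d => simp [hfilter]
      | none =>
        have hfind2 : List.find? (fun x => keyOfB x == q) (r :: vs)
            = List.find? (fun x => keyOfB x == q) vs := List.find?_cons_of_neg (by simp [hne])
        by_cases hm : q ∈ vs.map keyOfB <;>
          simp [hfilter, buildSpec, hm, hfind2, hq]


theorem foldl_rows_eq_foldl_valid (rows : List (List (String × String))) :
    ∀ L, rows.foldl stepA L = (rows.filter (fun r => rgetB r "Kernel Name" != "")).foldl stepA L := by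
  induction rows with
  | nil => intro L; rfl
  | cons r rs ih =>
    intro L
    by_cases h : rgetA r "Kernel Name" = ""
    · have hskip : stepA L r = L := by simp [stepA, h]
      have hf : (rgetB r "Kernel Name" != "") = false := by
        simp [show rgetB = rgetA from rfl, h]
      simp [hf, hskip, ih]
    · have hf : (rgetB r "Kernel Name" != "") = true := by
        simp [show rgetB = rgetA from rfl, h]
      simp [hf, ih]


theorem buildB_eq_buildSpec (valid : List (List (String × String))) (q : String × String) :
    buildB valid q = buildSpec valid q := by
  simp [buildB, buildSpec, seedB, seedA, show rgetB = rgetA from rfl,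
    List.head?_filter, List.headD_eq_head?_getD]


theorem main (rows : List (List (String × String))) :
    pivot_ncu_rows rows = pivot_ncu_rows_alt rows := by
  unfold pivot_ncu_rows pivot_ncu_rows_alt
  dsimp only
  set valid := rows.filter (fun r => rgetB r "Kernel Name" != "") with hvalid
  have hvkernel : ∀ r ∈ valid, rgetA r "Kernel Name" ≠ "" := by
    intro r hr
    have := List.of_mem_filter hr
    simpa [show rgetB = rgetA from rfl] using this
  set L := rows.foldl stepA PySem.Dict.empty with hL
  have hLv : L = valid.foldl stepA PySem.Dict.empty := foldl_rows_eq_foldl_valid rows _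
  set keysL := PySem.List.dedup (valid.map keyOfB) with hkeysL
  have hkeys : L.keys = keysL := by
    rw [hLv, foldlA_keys valid _ hvkernel, hkeysL]
    simp [PySem.Dict.keys_empty, PySem.Set.update_nil_left, PySem.List.dedup_eq_ofList]
  have hnd : L.keys.Nodup := by
    rw [hkeys, hkeysL, PySem.List.dedup_eq_ofList]; exact PySem.Set.nodup_ofList _
  have hval : ∀ q ∈ keysL, L.getD q PySem.Dict.empty = buildB valid q := by
    intro q hqmem
    have hq : q ∈ valid.map keyOfB := by
      rw [hkeysL, PySem.List.dedup_eq_ofList] at hqmem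
      exact (PySem.Set.mem_ofList _ _).mp hqmem
    have hg := foldlA_get? valid PySem.Dict.empty hvkernel q
    rw [← hLv] at hg
    rw [PySem.Dict.get?_empty] at hg
    simp only [hq, if_true] at hg
    rw [PySem.Dict.getD_eq_get?_getD, hg, buildB_eq_buildSpec]
    rfl
  have hitems : L.items = keysL.map (fun q => (q, L.getD q PySem.Dict.empty)) := by
    rw [PySem.Dict.items_eq_map_keys L hnd PySem.Dict.empty, hkeys]
  have hfold : (List.foldl (fun (res : PySem.Dict String (List (PySem.Dict String String))) p =>
        res.modify p.1.2 [] fun x => x ++ [p.2]) PySem.Dict.empty L.items)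
      = List.foldl (fun res p => res.modify p.1 [] fun x => x ++ [p.2]) PySem.Dict.empty
          (L.items.map (fun p => (p.1.2, p.2))) := (List.foldl_map
        (f := fun (p : (String × String) × PySem.Dict String String) => (p.1.2, p.2))
        (g := fun (res : PySem.Dict String (List (PySem.Dict String String))) p =>
          res.modify p.1 [] fun x => x ++ [p.2])
        (l := L.items) (init := PySem.Dict.empty)).symm
  rw [hfold]
  set R := List.foldl (fun (res : PySem.Dict String (List (PySem.Dict String String))) p =>
      res.modify p.1 [] fun x => x ++ [p.2]) PySem.Dict.empty
      (L.items.map (fun p => (p.1.2, p.2))) with hR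
  have hRkeys : R.keys = PySem.List.dedup (keysL.map Prod.snd) := by
    rw [hR, PySem.Dict.keys_foldl_modify_key (L.items.map (fun p => (p.1.2, p.2)))
      (fun p => p.1) [] (fun _ p => (fun x => x ++ [p.2]))]
    rw [PySem.Dict.keys_empty, PySem.Set.update_nil_left, hitems]
    rw [PySem.List.dedup_eq_ofList, List.map_map, List.map_map]
    congr 1
  have hRnd : R.keys.Nodup := by
    rw [hRkeys, PySem.List.dedup_eq_ofList]; exact PySem.Set.nodup_ofList _
  have hRval : ∀ k, R.getD k [] = (keysL.filter (fun key => key.2 == k)).map (buildB valid) := by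
    intro k
    rw [hR, PySem.Dict.getD_foldl_modify_append, PySem.Dict.getD_empty, hitems]
    simp only [List.map_map, List.filter_map, List.map_map, List.nil_append]
    apply List.map_congr_left
    intro q hqf
    simp only [Function.comp]
    exact hval q (List.mem_of_mem_filter hqf)
  rw [PySem.Dict.items_eq_map_keys R hRnd [], hRkeys]
  rw [List.map_map]
  apply List.map_congr_left
  intro k hk
  simp only [Function.comp]
  rw [hRval k, List.map_map]

-- ===== VERDICT (by name: the statement is the Claim_ definition above) =====
theorem pivot_ncu_rows_spec : Claim_equal_pivot_ncu_rows := by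
  intro rows _
  unfold Spec_pivot_ncu_rows
  exact main rows
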